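-- pv_equiv track=rewrite | github.com/johndongo67/ca117 | week01/lab2/password_012.py | security
-- ===== SOURCE A (Python) =====
-- def security(s):
--     lower = 0
--     upper = 0
--     digits = 0
--     other = 0
--     for char in s:
--         if "0" <= char and char <= "9":
--             digits = 1
--         elif "a" <= char and char <= "z":
--             lower = 1
--         elif "A" <= char and char <= "Z":
--             upper = 1
--         else:
--             other = 1
--     total = lower + upper + digits + other
--     return total
-- ===== SOURCE B (Python) =====
-- def security(s):
--     has_digit = any("0" <= c <= "9" for c in s)
--     has_lower = any("a" <= c <= "z" for c in s)
--     has_upper = any("A" <= c <= "Z" for c in s)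
--     has_other = any(not ("0" <= c <= "9" or "a" <= c <= "z" or "A" <= c <= "Z") for c in s)
--     return has_digit + has_lower + has_upper + has_other
-- ===== Notes on version B (the rewrite author's own statement) =====
-- stated objective: simpler
-- what changed: Replaces A's single pass with four mutable flag variables updated through an if/elif chain by four independent any() presence scans whose booleans are summed directly.
import Mathlib
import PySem

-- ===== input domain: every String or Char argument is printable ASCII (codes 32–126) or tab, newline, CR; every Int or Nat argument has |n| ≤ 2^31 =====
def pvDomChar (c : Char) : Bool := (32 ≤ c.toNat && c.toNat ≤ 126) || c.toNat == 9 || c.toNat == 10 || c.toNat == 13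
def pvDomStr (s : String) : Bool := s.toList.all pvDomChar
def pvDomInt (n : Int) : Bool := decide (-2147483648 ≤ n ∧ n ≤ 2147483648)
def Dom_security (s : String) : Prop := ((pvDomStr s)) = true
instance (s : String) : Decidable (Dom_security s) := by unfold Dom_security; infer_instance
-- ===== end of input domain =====

-- B replaces A's single if/elif flag-setting pass by four independent any() presence scans summed as 0/1; objective: simpler.

-- ===== PORT A =====
-- state (lower, upper, digits, other), updated per char exactly as A's if/elif chain
def securityStep (st : Int × Int × Int × Int) (c : Char) : Int × Int × Int × Int :=
  if '0' ≤ c ∧ c ≤ '9' then (st.1, st.2.1, 1, st.2.2.2)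
  else if 'a' ≤ c ∧ c ≤ 'z' then (1, st.2.1, st.2.2.1, st.2.2.2)
  else if 'A' ≤ c ∧ c ≤ 'Z' then (st.1, 1, st.2.2.1, st.2.2.2)
  else (st.1, st.2.1, st.2.2.1, 1)

def security (s : String) : Int :=
  let st := s.toList.foldl securityStep (0, 0, 0, 0)
  st.1 + st.2.1 + st.2.2.1 + st.2.2.2

-- ===== PORT B =====
def security_alt (s : String) : Int :=
  let hasDigit := s.toList.any (fun c => decide ('0' ≤ c ∧ c ≤ '9'))
  let hasLower := s.toList.any (fun c => decide ('a' ≤ c ∧ c ≤ 'z'))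
  let hasUpper := s.toList.any (fun c => decide ('A' ≤ c ∧ c ≤ 'Z'))
  let hasOther := s.toList.any (fun c => decide (¬(('0' ≤ c ∧ c ≤ '9') ∨ ('a' ≤ c ∧ c ≤ 'z') ∨ ('A' ≤ c ∧ c ≤ 'Z'))))
  (if hasDigit then 1 else 0) + (if hasLower then 1 else 0) +
  (if hasUpper then 1 else 0) + (if hasOther then 1 else 0)

-- ===== PRECONDITION & SPEC =====
def Spec_security (s : String) (out : Int) : Prop := out = security_alt s
instance (s : String) (out : Int) : Decidable (Spec_security s out) := by unfold Spec_security; infer_instance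

-- ===== CLAIM (what is proved, stated in full; the proofs are below) =====
def Claim_equal_security : Prop := ∀ (s : String), Dom_security s → Spec_security s (security s)

-- ===== LEMMAS AND PROOFS =====
theorem security_fold_char (l : List Char) (lo up di ot : Int) :
    l.foldl securityStep (lo, up, di, ot) =
      ((if l.any (fun c => decide ('a' ≤ c ∧ c ≤ 'z')) then 1 else lo),
       (if l.any (fun c => decide ('A' ≤ c ∧ c ≤ 'Z')) then 1 else up),
       (if l.any (fun c => decide ('0' ≤ c ∧ c ≤ '9')) then 1 else di),
       (if l.any (fun c => decide (¬(('0' ≤ c ∧ c ≤ '9') ∨ ('a' ≤ c ∧ c ≤ 'z') ∨ ('A' ≤ c ∧ c ≤ 'Z')))) then 1 else ot)) := by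
  induction l generalizing lo up di ot with
  | nil => simp
  | cons c l ih =>
    have hcl : c ≤ '9' ↔ c.val ≤ 57 := Iff.rfl
    simp only [List.foldl_cons, List.any_cons, securityStep]
    by_cases hd : '0' ≤ c ∧ c ≤ '9'
    · have h1 : ¬('a' ≤ c ∧ c ≤ 'z') := by
        rcases hd with ⟨h1, h2⟩
        rintro ⟨h3, _⟩
        exact absurd (le_trans h3 h2) (by decide)
      have h2 : ¬('A' ≤ c ∧ c ≤ 'Z') := by
        rcases hd with ⟨ha, hb⟩
        rintro ⟨h3, _⟩
        exact absurd (le_trans h3 hb) (by decide)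
      simp [hd, h1, h2, ih]
    · by_cases hl : 'a' ≤ c ∧ c ≤ 'z'
      · have h2 : ¬('A' ≤ c ∧ c ≤ 'Z') := by
          rcases hl with ⟨ha, _⟩
          rintro ⟨_, h4⟩
          exact absurd (le_trans ha h4) (by decide)
        simp [hd, hl, h2, ih]
      · by_cases hu : 'A' ≤ c ∧ c ≤ 'Z'
        · simp [hd, hl, hu, ih]
        · simp [hd, hl, hu, ih]

-- ===== VERDICT (by name: the statement is the Claim_ definition above) =====
theorem security_spec : Claim_equal_security := by
  intro s _
  unfold Spec_security security security_alt
  simp [security_fold_char]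
  split_ifs <;> ring
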